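-- pv_equiv track=rewrite | github.com/mlibrary/dspace-containerization | dotpy/calc_widths.py | compute_table_widths
-- ===== SOURCE A (Python) =====
-- def compute_table_widths(lines):
--     """
--     Walk *lines* (list[str]) and return one entry per table found.
--
--     Returns: list of (start_lineno: int, col_widths: list[int])
--         start_lineno  — 1-based line number of the table header row
--         col_widths[i] — maximum between-pipe character count for column i,
--                         across all rows (header, separator, and data rows)
--     """
--     results = []
--     in_table = False
--     table_start = 0
--     col_max = []
--
--     for i, line in enumerate(lines, 1):
--         stripped = line.rstrip('\n')
--         is_row = stripped.startswith('|') and stripped.endswith('|')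
--
--         if is_row:
--             parts = stripped.split('|')[1:-1]
--             widths = [len(p) for p in parts]
--
--             if not in_table:
--                 in_table = True
--                 table_start = i
--                 col_max = list(widths)
--             else:
--                 for j, w in enumerate(widths):
--                     if j < len(col_max):
--                         col_max[j] = max(col_max[j], w)
--                     else:
--                         col_max.append(w)
--         else:
--             if in_table:
--                 results.append((table_start, list(col_max)))
--             in_table = False
--             col_max = []
--
--     if in_table:
--         results.append((table_start, list(col_max)))
--
--     return results
-- ===== SOURCE B (Python) =====
-- def compute_table_widths(lines):
--     """Segment-then-aggregate: find maximal runs of pipe rows, then take per-column maxima."""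
--     def is_row(line):
--         s = line.rstrip('\n')
--         return s.startswith('|') and s.endswith('|')
--
--     def widths(line):
--         return [len(p) for p in line.rstrip('\n').split('|')[1:-1]]
--
--     results = []
--     i = 0
--     n = len(lines)
--     while i < n:
--         if not is_row(lines[i]):
--             i += 1
--             continue
--         start = i + 1
--         j = i
--         while j < n and is_row(lines[j]):
--             j += 1
--         rows = [widths(lines[k]) for k in range(i, j)]
--         ncols = max(len(r) for r in rows)
--         cols = [max((r[c] if c < len(r) else 0) for r in rows) for c in range(ncols)]
--         results.append((start, cols))
--         i = j
--     return results
-- ===== Notes on version B (the rewrite author's own statement) =====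
-- stated objective: alternative
-- what changed: Replaces A's single-pass in_table/col_max running-max state machine with a segment-then-aggregate decomposition: B scans for maximal runs of pipe rows, collects each run's per-row width lists, and computes column maxima by index-wise transposition (missing cells as 0).
import Mathlib
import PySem

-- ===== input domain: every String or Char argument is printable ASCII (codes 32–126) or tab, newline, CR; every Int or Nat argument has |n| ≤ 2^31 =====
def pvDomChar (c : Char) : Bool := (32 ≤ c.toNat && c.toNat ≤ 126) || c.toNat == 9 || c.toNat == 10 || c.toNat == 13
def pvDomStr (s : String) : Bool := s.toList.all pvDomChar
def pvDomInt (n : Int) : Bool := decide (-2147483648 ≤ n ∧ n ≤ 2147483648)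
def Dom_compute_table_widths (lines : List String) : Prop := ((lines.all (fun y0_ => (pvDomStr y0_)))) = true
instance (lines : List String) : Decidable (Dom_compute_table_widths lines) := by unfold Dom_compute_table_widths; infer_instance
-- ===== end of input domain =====

-- B replaces A's incremental in_table/col_max state machine by a segment-then-aggregate
-- decomposition (find maximal runs of pipe rows, then take per-column maxima); alternative, not faster.

-- ===== PORT A =====

-- line.rstrip('\n'): drop trailing newline chars (hand port, exact: PySem has no rstrip-with-chars)
def pvRstripNL (s : List Char) : List Char := (s.reverse.dropWhile (fun c => c == '\n')).reverse

-- stripped.startswith('|') and stripped.endswith('|')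
def pvIsRow (line : String) : Bool :=
  let stripped := pvRstripNL line.toList
  PySem.Chars.startswith stripped ['|'] && PySem.Chars.endswith stripped ['|']

-- [len(p) for p in stripped.split('|')[1:-1]]
def pvWidths (line : String) : List Int :=
  (PySem.List.slice (PySem.Chars.splitOn (pvRstripNL line.toList) ['|']) (some 1) (some (-1))).map
    (fun p => (p.length : Int))

-- the inner 'for j, w in enumerate(widths)' loop mutating col_max
def pvInner (cm : List Int) (j : Nat) (ws : List Int) : List Int :=
  match ws with
  | [] => cm
  | w :: ws' =>
      if j < cm.length then pvInner (cm.set j (max (cm.getD j 0) w)) (j + 1) ws'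
      else pvInner (cm ++ [w]) (j + 1) ws'

-- the main 'for i, line in enumerate(lines, 1)' loop, state (results, in_table, table_start, col_max)
def pvGoA (ls : List String) (i : Int) (res : List (Int × List Int)) (inTable : Bool)
    (tableStart : Int) (cm : List Int) : List (Int × List Int) :=
  match ls with
  | [] => if inTable then res ++ [(tableStart, cm)] else res
  | l :: rest =>
      if pvIsRow l then
        let ws := pvWidths l
        if !inTable then pvGoA rest (i + 1) res true i ws
        else pvGoA rest (i + 1) res true tableStart (pvInner cm 0 ws)
      else
        if inTable then pvGoA rest (i + 1) (res ++ [(tableStart, cm)]) false tableStart []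
        else pvGoA rest (i + 1) res false tableStart []

def compute_table_widths (lines : List String) : List (Int × List Int) :=
  pvGoA lines 1 [] false 0 []

-- ===== PORT B =====

-- max(len(r) for r in rows), rows nonempty (first element given separately)
def pvMaxLenB (r : List Int) (rs : List (List Int)) : Nat :=
  rs.foldl (fun m r' => max m r'.length) r.length

-- [max((r[c] if c < len(r) else 0) for r in rows) for c in range(ncols)]
def pvColMax (rows : List (List Int)) : List Int :=
  match rows with
  | [] => []
  | r :: rs =>
      (List.range (pvMaxLenB r rs)).map
        (fun c => rs.foldl (fun m r' => max m (r'.getD c 0)) (r.getD c 0))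

-- the outer while loop: skip non-rows; at a row, consume the maximal run and aggregate
def pvGoB (ls : List String) (i : Int) : List (Int × List Int) :=
  match ls with
  | [] => []
  | l :: rest =>
      if pvIsRow l then
        (i, pvColMax ((l :: rest.takeWhile pvIsRow).map pvWidths)) ::
          pvGoB (rest.dropWhile pvIsRow) (i + 1 + (rest.takeWhile pvIsRow).length)
      else pvGoB rest (i + 1)
termination_by ls.length
decreasing_by
  · simpa using Nat.lt_succ_of_le (List.length_dropWhile_le pvIsRow rest)
  · simp

def compute_table_widths_alt (lines : List String) : List (Int × List Int) :=
  pvGoB lines 1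

-- ===== PRECONDITION & SPEC =====
def Spec_compute_table_widths (lines : List String) (out : List (Int × List Int)) : Prop := out = compute_table_widths_alt lines
instance (lines : List String) (out : List (Int × List Int)) : Decidable (Spec_compute_table_widths lines out) := by unfold Spec_compute_table_widths; infer_instance

-- ===== CLAIM (what is proved, stated in full; the proofs are below) =====
def Claim_equal_compute_table_widths : Prop := ∀ (lines : List String), Dom_compute_table_widths lines → Spec_compute_table_widths lines (compute_table_widths lines)

-- ===== LEMMAS AND PROOFS =====

-- proof-side zip view of A's inner loop
def pvMerge : List Int → List Int → List Int
  | a, [] => a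
  | [], w :: ws => w :: pvMerge [] ws
  | x :: a, w :: ws => max x w :: pvMerge a ws

theorem pvInner_eq (ws : List Int) : ∀ (c₁ c₂ : List Int),
    pvInner (c₁ ++ c₂) c₁.length ws = c₁ ++ pvMerge c₂ ws := by
  induction ws with
  | nil => intro c₁ c₂; simp [pvInner, pvMerge]
  | cons w ws' ih =>
    intro c₁ c₂
    match c₂ with
    | [] =>
      simp only [pvInner, List.append_nil, lt_irrefl]
      have h := ih (c₁ ++ [w]) []
      simp only [List.append_nil, List.length_append, List.length_cons,
        List.length_nil] at h
      simpa [pvMerge] using h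
    | x :: rest =>
      have hlt : c₁.length < (c₁ ++ x :: rest).length := by simp
      simp only [pvInner, if_pos hlt]
      have hset : (c₁ ++ x :: rest).set c₁.length (max ((c₁ ++ x :: rest).getD c₁.length 0) w)
          = c₁ ++ (max x w) :: rest := by
        have : (c₁ ++ x :: rest).getD c₁.length 0 = x := by
          simp
        rw [this, List.set_append_right _ _ (le_refl _)]
        simp
      rw [hset]
      have h := ih (c₁ ++ [max x w]) rest
      simp only [List.length_append, List.length_cons, List.length_nil,
        List.append_assoc, List.cons_append, List.nil_append] at h
      simpa [pvMerge] using h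

theorem pvMerge_length (a b : List Int) : (pvMerge a b).length = max a.length b.length := by
  fun_induction pvMerge a b <;> simp [*]

theorem pvMerge_getD (a b : List Int) (ha : ∀ x ∈ a, 0 ≤ x) (hb : ∀ x ∈ b, 0 ≤ x) (j : Nat) :
    (pvMerge a b).getD j 0 = max (a.getD j 0) (b.getD j 0) := by
  induction a, b using pvMerge.induct generalizing j with
  | case1 a =>
    simp only [pvMerge, List.getD_nil]
    have h0 : 0 ≤ a.getD j 0 := by
      rcases Nat.lt_or_ge j a.length with h | h
      · rw [List.getD_eq_getElem _ _ h]; exact ha _ (List.getElem_mem h)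
      · rw [List.getD_eq_default _ _ h]
    omega
  | case2 w ws ih =>
    cases j with
    | zero =>
      have hw : 0 ≤ w := hb w (by simp)
      simp [pvMerge]; omega
    | succ k =>
      simp only [pvMerge, List.getD_cons_succ, List.getD_nil]
      have := ih (by simp) (fun x hx => hb x (by simp [hx])) k
      simpa using this
  | case3 x a w ws ih =>
    cases j with
    | zero => simp [pvMerge]
    | succ k =>
      simp only [pvMerge, List.getD_cons_succ]
      exact ih (fun y hy => ha y (by simp [hy])) (fun y hy => hb y (by simp [hy])) k

theorem pvMerge_nonneg (a b : List Int) (ha : ∀ x ∈ a, 0 ≤ x) (hb : ∀ x ∈ b, 0 ≤ x) :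
    ∀ x ∈ pvMerge a b, 0 ≤ x := by
  induction a, b using pvMerge.induct with
  | case1 a => simpa [pvMerge] using ha
  | case2 w ws ih =>
    intro x hx
    simp only [pvMerge, List.mem_cons] at hx
    rcases hx with rfl | hx
    · exact hb x (by simp)
    · exact ih (by simp) (fun y hy => hb y (by simp [hy])) x hx
  | case3 y a w ws ih =>
    intro x hx
    simp only [pvMerge, List.mem_cons] at hx
    rcases hx with rfl | hx
    · exact le_max_of_le_left (ha y (by simp))
    · exact ih (fun z hz => ha z (by simp [hz])) (fun z hz => hb z (by simp [hz])) x hx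

theorem pvWidths_nonneg (l : String) : ∀ x ∈ pvWidths l, 0 ≤ x := by
  intro x hx
  simp only [pvWidths, List.mem_map] at hx
  obtain ⟨p, -, rfl⟩ := hx
  exact Int.natCast_nonneg _

-- the three facts about A's running fold of pvMerge, in one induction
theorem pvFoldlMerge_spec (rows : List (List Int)) (w : List Int)
    (hw : ∀ x ∈ w, 0 ≤ x) (hr : ∀ r ∈ rows, ∀ x ∈ r, 0 ≤ x) :
    (∀ x ∈ rows.foldl pvMerge w, 0 ≤ x) ∧
    (rows.foldl pvMerge w).length = rows.foldl (fun m r => max m r.length) w.length ∧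
    (∀ j : Nat, (rows.foldl pvMerge w).getD j 0 =
        rows.foldl (fun m r => max m (r.getD j 0)) (w.getD j 0)) := by
  induction rows generalizing w with
  | nil => exact ⟨hw, rfl, fun j => rfl⟩
  | cons r rs ih =>
    have hr0 : ∀ x ∈ r, 0 ≤ x := hr r (by simp)
    have hrs : ∀ r' ∈ rs, ∀ x ∈ r', 0 ≤ x := fun r' h => hr r' (by simp [h])
    have hm : ∀ x ∈ pvMerge w r, 0 ≤ x := pvMerge_nonneg w r hw hr0
    obtain ⟨h1, h2, h3⟩ := ih (pvMerge w r) hm hrs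
    refine ⟨by simpa using h1, ?_, ?_⟩
    · simp only [List.foldl_cons]
      rw [h2, pvMerge_length]
    · intro j
      simp only [List.foldl_cons]
      rw [h3 j, pvMerge_getD w r hw hr0 j]

theorem pvColMax_eq_foldl (w : List Int) (rows : List (List Int))
    (hw : ∀ x ∈ w, 0 ≤ x) (hr : ∀ r ∈ rows, ∀ x ∈ r, 0 ≤ x) :
    pvColMax (w :: rows) = rows.foldl pvMerge w := by
  obtain ⟨-, hlen, hget⟩ := pvFoldlMerge_spec rows w hw hr
  apply List.ext_getElem
  · simp [pvColMax, pvMaxLenB, hlen]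
  · intro i h1 h2
    simp only [pvColMax, pvMaxLenB, List.getElem_map, List.getElem_range]
    rw [← List.getD_eq_getElem _ 0 h2, hget i]

theorem pvGoA_eq_pvGoB (ls : List String) :
    (∀ (i s0 : Int) (res : List (Int × List Int)),
        pvGoA ls i res false s0 [] = res ++ pvGoB ls i) ∧
    (∀ (i start : Int) (res : List (Int × List Int)) (cm : List Int),
        pvGoA ls i res true start cm =
          res ++ (start, ((ls.takeWhile pvIsRow).map pvWidths).foldl pvMerge cm) ::
            pvGoB (ls.dropWhile pvIsRow) (i + (ls.takeWhile pvIsRow).length)) := by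
  induction ls with
  | nil =>
    constructor <;> intros <;> simp [pvGoA, pvGoB]
  | cons l rest ih =>
    have hnn : ∀ r ∈ rest.takeWhile pvIsRow |>.map pvWidths, ∀ x ∈ r, 0 ≤ x := by
      intro r hr
      simp only [List.mem_map] at hr
      obtain ⟨l', -, rfl⟩ := hr
      exact pvWidths_nonneg l'
    constructor
    · intro i s0 res
      by_cases h : pvIsRow l
      · simp only [pvGoA, h, if_pos, Bool.not_false]
        rw [ih.2]
        simp only [pvGoB, h, if_true, List.map_cons]
        rw [pvColMax_eq_foldl (pvWidths l) _ (pvWidths_nonneg l) hnn]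
      · simp only [pvGoA, h, Bool.false_eq_true, ite_false]
        rw [ih.1]
        simp [pvGoB, h]
    · intro i start res cm
      by_cases h : pvIsRow l
      · simp only [pvGoA, h, Bool.not_true, Bool.false_eq_true, ite_true, ite_false]
        have hinner : pvInner cm 0 (pvWidths l) = pvMerge cm (pvWidths l) := by
          simpa using pvInner_eq (pvWidths l) [] cm
        rw [hinner, ih.2]
        simp only [List.takeWhile_cons_of_pos h, List.dropWhile_cons_of_pos h,
          List.map_cons, List.foldl_cons, List.length_cons]
        congr 3
        push_cast
        ring
      · simp only [pvGoA, h, Bool.false_eq_true, ite_false]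
        rw [ih.1]
        simp [pvGoB, h, List.takeWhile_cons_of_neg h, List.dropWhile_cons_of_neg h]

-- ===== VERDICT (by name: the statement is the Claim_ definition above) =====
theorem compute_table_widths_spec : Claim_equal_compute_table_widths := by
  intro lines _
  unfold Spec_compute_table_widths compute_table_widths compute_table_widths_alt
  simpa using (pvGoA_eq_pvGoB lines).1 1 0 []
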